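-- pv_equiv track=rewrite | github.com/Mickleburg/HackatonCentralUniversity | src/merge_predictions.py | merge_overlapping_spans
-- ===== SOURCE A (Python) =====
-- from typing import List, Tuple, Set
--
-- def _spans_overlap(span1: Tuple[int, int], span2: Tuple[int, int]) -> bool:
--     """
--     Проверяет, пересекаются ли два span'а.
--     """
--     start1, end1 = span1
--     start2, end2 = span2
--     return not (end1 <= start2 or end2 <= start1)
--
-- def merge_overlapping_spans(
--     spans: List[Tuple[int, int, str]],
--     strategy: str = "union"
-- ) -> List[Tuple[int, int, str]]:
--     """
--     Слияние перекрывающихся spans.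
--     strategy:
--       - union: объединить интервалы
--       - keep_first: оставить первый
--     """
--     if not spans:
--         return []
--
--     spans = sorted(spans, key=lambda x: (x[0], x[1], x[2]))
--
--     if strategy not in {"union", "keep_first"}:
--         raise ValueError("strategy must be 'union' or 'keep_first'")
--
--     result = [spans[0]]
--
--     for start, end, label in spans[1:]:
--         last_start, last_end, last_label = result[-1]
--
--         if _spans_overlap((last_start, last_end), (start, end)):
--             if strategy == "union":
--                 merged_label = last_label if last_label == label else f"{last_label}/{label}"
--                 result[-1] = (min(last_start, start), max(last_end, end), merged_label)
--         else:
--             result.append((start, end, label))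
--
--     return result
-- ===== SOURCE B (Python) =====
-- def merge_overlapping_spans(spans, strategy="union"):
--     """Two-pass re-implementation: group sorted spans into clusters, then emit one span per cluster."""
--     if not spans:
--         return []
--     if strategy not in ("union", "keep_first"):
--         raise ValueError("strategy must be 'union' or 'keep_first'")
--
--     ordered = sorted(spans)
--
--     # pass 1: group into clusters of chained-overlapping spans
--     clusters = []
--     cur = [ordered[0]]
--     lo, hi = ordered[0][0], ordered[0][1]
--     for sp in ordered[1:]:
--         s, e, _ = sp
--         if hi > s and e > lo:
--             cur.append(sp)
--             if strategy == "union":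
--                 lo = min(lo, s)
--                 hi = max(hi, e)
--         else:
--             clusters.append(cur)
--             cur = [sp]
--             lo, hi = s, e
--     clusters.append(cur)
--
--     # pass 2: one output span per cluster
--     if strategy == "keep_first":
--         return [c[0] for c in clusters]
--     out = []
--     for c in clusters:
--         label = c[0][2]
--         for _, _, lb in c[1:]:
--             if lb != label:
--                 label = f"{label}/{lb}"
--         out.append((min(s for s, _, _ in c), max(e for _, e, _ in c), label))
--     return out
-- ===== Notes on version B (the rewrite author's own statement) =====
-- stated objective: alternative
-- what changed: A merges in one pass by repeatedly overwriting result[-1]; B first groups the sorted spans into clusters of chained-overlapping spans and then maps each cluster to one output span (first span for keep_first; min-start/max-end/label chain for union).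
import Mathlib
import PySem

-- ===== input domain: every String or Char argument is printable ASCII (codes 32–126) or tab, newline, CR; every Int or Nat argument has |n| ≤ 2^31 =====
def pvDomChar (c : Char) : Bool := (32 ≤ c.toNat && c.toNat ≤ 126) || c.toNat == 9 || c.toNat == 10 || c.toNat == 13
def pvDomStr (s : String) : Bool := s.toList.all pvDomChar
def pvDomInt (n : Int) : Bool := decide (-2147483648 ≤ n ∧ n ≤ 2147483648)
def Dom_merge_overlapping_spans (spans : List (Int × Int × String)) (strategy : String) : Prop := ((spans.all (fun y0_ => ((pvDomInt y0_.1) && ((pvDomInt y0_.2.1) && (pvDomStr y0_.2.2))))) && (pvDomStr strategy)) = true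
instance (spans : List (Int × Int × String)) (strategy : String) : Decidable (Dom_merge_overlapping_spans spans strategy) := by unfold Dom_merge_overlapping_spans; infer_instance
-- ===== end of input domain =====

-- B replaces A's in-place mutation of result[-1] by a cluster/grouping two-pass decomposition (objective: alternative, same cost).

-- shared helper: Python's sorted(list_of_triples) = stable sort by the lexicographic triple.
-- PySem has sorted (one key) and sorted2 (two lexicographic keys); a three-key stable sort is
-- exact as a stable two-key sort of a stable sort by the least-significant key (stability of insertion sort).
def pvSortSpans (spans : List (Int × Int × String)) : List (Int × Int × String) :=
  PySem.List.sorted2 (PySem.List.sorted spans (fun x => x.2.2)) (fun x => x.1) (fun x => x.2.1)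

-- Python min(a, b) / max(a, b) (first argument kept on ties)
def pvMinI (a b : Int) : Int := if b < a then b else a
def pvMaxI (a b : Int) : Int := if b > a then b else a

-- ===== PORT A =====
-- A's loop keeps `result`; we model it as (all-but-last, last): result[-1] reads/writes touch the
-- second component, result.append pushes the old last into the first component.
def pvStepA (strategy : String) (acc : List (Int × Int × String) × (Int × Int × String))
    (sp : Int × Int × String) : List (Int × Int × String) × (Int × Int × String) :=
  let init := acc.1
  let ls := acc.2.1; let le := acc.2.2.1; let ll := acc.2.2.2
  let s := sp.1; let e := sp.2.1; let lb := sp.2.2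
  if !(decide (le ≤ s) || decide (e ≤ ls)) then      -- _spans_overlap
    if strategy == "union" then
      (init, (pvMinI ls s, pvMaxI le e, if ll == lb then ll else ll ++ "/" ++ lb))
    else
      (init, (ls, le, ll))
  else
    (init ++ [(ls, le, ll)], (s, e, lb))

def merge_overlapping_spans (spans : List (Int × Int × String)) (strategy : String) : List (Int × Int × String) :=
  if spans.isEmpty then []
  else if !(strategy == "union" || strategy == "keep_first") then []   -- Python raises ValueError here; excluded by Pre_
  else
    match pvSortSpans spans with
    | [] => []                                                          -- unreachable: spans ≠ []
    | h :: t =>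
      let r := t.foldl (pvStepA strategy) ([], h)
      r.1 ++ [r.2]

-- ===== PORT B =====
def pvFirst (c : List (Int × Int × String)) : Int × Int × String := c.headD (0, 0, "")

-- min(s for s,_,_ in c) / max(e for _,e,_ in c): left fold from the first element (c never empty in B)
def pvMinStart (c : List (Int × Int × String)) : Int :=
  match c with
  | [] => 0
  | x :: rest => rest.foldl (fun m sp => pvMinI m sp.1) x.1

def pvMaxEnd (c : List (Int × Int × String)) : Int :=
  match c with
  | [] => 0
  | x :: rest => rest.foldl (fun m sp => pvMaxI m sp.2.1) x.2.1

-- the label chain: label = c[0][2]; for later lb: label = label if lb == label else f"{label}/{lb}"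
def pvLabelOf (c : List (Int × Int × String)) : String :=
  match c with
  | [] => ""
  | x :: rest => rest.foldl (fun acc sp => if acc == sp.2.2 then acc else acc ++ "/" ++ sp.2.2) x.2.2

-- pass 1 step: state = (finished clusters, current cluster, lo, hi)
def pvClusterStep (strategy : String)
    (st : List (List (Int × Int × String)) × List (Int × Int × String) × Int × Int)
    (sp : Int × Int × String) : List (List (Int × Int × String)) × List (Int × Int × String) × Int × Int :=
  let cls := st.1; let cur := st.2.1; let lo := st.2.2.1; let hi := st.2.2.2
  let s := sp.1; let e := sp.2.1
  if decide (s < hi) && decide (lo < e) then         -- hi > s and e > lo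
    if strategy == "union" then (cls, cur ++ [sp], pvMinI lo s, pvMaxI hi e)
    else (cls, cur ++ [sp], lo, hi)
  else
    (cls ++ [cur], [sp], s, e)

def merge_overlapping_spans_alt (spans : List (Int × Int × String)) (strategy : String) : List (Int × Int × String) :=
  if spans.isEmpty then []
  else if !(strategy == "union" || strategy == "keep_first") then []   -- Python raises ValueError here; excluded by Pre_
  else
    match pvSortSpans spans with
    | [] => []                                                          -- unreachable: spans ≠ []
    | h :: t =>
      let st := t.foldl (pvClusterStep strategy) ([], [h], h.1, h.2.1)
      let clusters := st.1 ++ [st.2.1]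
      if strategy == "keep_first" then clusters.map pvFirst
      else clusters.map (fun c => (pvMinStart c, pvMaxEnd c, pvLabelOf c))

-- ===== PRECONDITION & SPEC =====
-- Pre_ excludes only the inputs where A raises ValueError: a non-empty list with a strategy other
-- than "union"/"keep_first" (the empty list returns [] before validation, so it stays inside).
def Pre_merge_overlapping_spans (spans : List (Int × Int × String)) (strategy : String) : Prop :=
  spans = [] ∨ strategy = "union" ∨ strategy = "keep_first"
instance (spans : List (Int × Int × String)) (strategy : String) : Decidable (Pre_merge_overlapping_spans spans strategy) := by unfold Pre_merge_overlapping_spans; infer_instance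

def pvWitness_merge_overlapping_spans : (List (Int × Int × String)) × String := ([(0, 2, "a"), (1, 3, "b")], "union")

def Spec_merge_overlapping_spans (spans : List (Int × Int × String)) (strategy : String) (out : List (Int × Int × String)) : Prop := out = merge_overlapping_spans_alt spans strategy
instance (spans : List (Int × Int × String)) (strategy : String) (out : List (Int × Int × String)) : Decidable (Spec_merge_overlapping_spans spans strategy out) := by unfold Spec_merge_overlapping_spans; infer_instance

-- ===== CLAIM (what is proved, stated in full; the proofs are below) =====
def Claim_equal_merge_overlapping_spans : Prop := ∀ (spans : List (Int × Int × String)) (strategy : String), Dom_merge_overlapping_spans spans strategy → Pre_merge_overlapping_spans spans strategy → Spec_merge_overlapping_spans spans strategy (merge_overlapping_spans spans strategy)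

-- ===== LEMMAS AND PROOFS =====

-- the union-strategy summary of one cluster
def pvOutU (c : List (Int × Int × String)) : Int × Int × String := (pvMinStart c, pvMaxEnd c, pvLabelOf c)

lemma pvMinStart_append (c : List (Int × Int × String)) (hc : c ≠ []) (sp : Int × Int × String) :
    pvMinStart (c ++ [sp]) = pvMinI (pvMinStart c) sp.1 := by
  cases c with
  | nil => exact absurd rfl hc
  | cons x rest => simp [pvMinStart, List.foldl_append]

lemma pvMaxEnd_append (c : List (Int × Int × String)) (hc : c ≠ []) (sp : Int × Int × String) :
    pvMaxEnd (c ++ [sp]) = pvMaxI (pvMaxEnd c) sp.2.1 := by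
  cases c with
  | nil => exact absurd rfl hc
  | cons x rest => simp [pvMaxEnd, List.foldl_append]

lemma pvLabelOf_append (c : List (Int × Int × String)) (hc : c ≠ []) (sp : Int × Int × String) :
    pvLabelOf (c ++ [sp]) = if pvLabelOf c == sp.2.2 then pvLabelOf c else pvLabelOf c ++ "/" ++ sp.2.2 := by
  cases c with
  | nil => exact absurd rfl hc
  | cons x rest => simp [pvLabelOf, List.foldl_append]

lemma pvFirst_append (c : List (Int × Int × String)) (hc : c ≠ []) (sp : Int × Int × String) :
    pvFirst (c ++ [sp]) = pvFirst c := by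
  cases c with
  | nil => exact absurd rfl hc
  | cons x rest => simp [pvFirst]

-- simulation, union strategy: A's (init, last) is B's (map pvOutU clusters, pvOutU cur)
lemma pvSimUnion (t : List (Int × Int × String)) :
    ∀ (init : List (Int × Int × String)) (cls : List (List (Int × Int × String)))
      (cur : List (Int × Int × String)), cur ≠ [] →
      init = cls.map pvOutU →
      (t.foldl (pvStepA "union") (init, pvOutU cur)).1 ++ [(t.foldl (pvStepA "union") (init, pvOutU cur)).2]
        = ((t.foldl (pvClusterStep "union") (cls, cur, pvMinStart cur, pvMaxEnd cur)).1
            ++ [(t.foldl (pvClusterStep "union") (cls, cur, pvMinStart cur, pvMaxEnd cur)).2.1]).map pvOutU := by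
  induction t with
  | nil => intro init cls cur hc hinit; simp [hinit, pvOutU]
  | cons sp rest ih =>
    intro init cls cur hc hinit
    simp only [List.foldl_cons]
    by_cases hov : sp.1 < pvMaxEnd cur ∧ pvMinStart cur < sp.2.1
    · have hb1 : (decide (sp.1 < pvMaxEnd cur) && decide (pvMinStart cur < sp.2.1)) = true := by
        simp; omega
      have hA : pvStepA "union" (init, pvOutU cur) sp
          = (init, pvOutU (cur ++ [sp])) := by
        simp [pvStepA, pvOutU,
              pvMinStart_append cur hc, pvMaxEnd_append cur hc, pvLabelOf_append cur hc]
        all_goals omega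
      have hB : pvClusterStep "union" (cls, cur, pvMinStart cur, pvMaxEnd cur) sp
          = (cls, cur ++ [sp], pvMinStart (cur ++ [sp]), pvMaxEnd (cur ++ [sp])) := by
        simp [pvClusterStep, hb1,
              pvMinStart_append cur hc, pvMaxEnd_append cur hc]
      rw [hA, hB]
      exact ih init cls (cur ++ [sp]) (by simp) hinit
    · have hb1 : (decide (sp.1 < pvMaxEnd cur) && decide (pvMinStart cur < sp.2.1)) = false := by
        simp only [Bool.and_eq_false_iff, decide_eq_false_iff_not]; omega
      have hA : pvStepA "union" (init, pvOutU cur) sp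
          = (init ++ [pvOutU cur], (sp.1, sp.2.1, sp.2.2)) := by
        simp [pvStepA, pvOutU]
        all_goals omega
      have hB : pvClusterStep "union" (cls, cur, pvMinStart cur, pvMaxEnd cur) sp
          = (cls ++ [cur], [sp], sp.1, sp.2.1) := by
        simp [pvClusterStep, hb1]
      rw [hA, hB]
      have hsp : (sp.1, sp.2.1, sp.2.2) = pvOutU [sp] := by simp [pvOutU, pvMinStart, pvMaxEnd, pvLabelOf]
      have hstart : pvMinStart [sp] = sp.1 := rfl
      have hend : pvMaxEnd [sp] = sp.2.1 := rfl
      rw [hsp, ← hstart, ← hend]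
      exact ih (init ++ [pvOutU cur]) (cls ++ [cur]) [sp] (by simp) (by simp [hinit])

-- simulation, keep_first strategy: A's (init, last) is B's (map pvFirst clusters, pvFirst cur)
lemma pvSimKeepFirst (t : List (Int × Int × String)) :
    ∀ (init : List (Int × Int × String)) (cls : List (List (Int × Int × String)))
      (cur : List (Int × Int × String)), cur ≠ [] →
      init = cls.map pvFirst →
      (t.foldl (pvStepA "keep_first") (init, pvFirst cur)).1 ++ [(t.foldl (pvStepA "keep_first") (init, pvFirst cur)).2]
        = ((t.foldl (pvClusterStep "keep_first") (cls, cur, (pvFirst cur).1, (pvFirst cur).2.1)).1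
            ++ [(t.foldl (pvClusterStep "keep_first") (cls, cur, (pvFirst cur).1, (pvFirst cur).2.1)).2.1]).map pvFirst := by
  induction t with
  | nil => intro init cls cur hc hinit; simp [hinit]
  | cons sp rest ih =>
    intro init cls cur hc hinit
    simp only [List.foldl_cons]
    by_cases hov : sp.1 < (pvFirst cur).2.1 ∧ (pvFirst cur).1 < sp.2.1
    · have hb1 : (decide (sp.1 < (pvFirst cur).2.1) && decide ((pvFirst cur).1 < sp.2.1)) = true := by
        simp; omega
      have hA : pvStepA "keep_first" (init, pvFirst cur) sp = (init, pvFirst cur) := by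
        simp [pvStepA]
        all_goals omega
      have hB : pvClusterStep "keep_first" (cls, cur, (pvFirst cur).1, (pvFirst cur).2.1) sp
          = (cls, cur ++ [sp], (pvFirst cur).1, (pvFirst cur).2.1) := by
        simp [pvClusterStep, hb1]
      rw [hA, hB]
      have := ih init cls (cur ++ [sp]) (by simp) hinit
      rwa [pvFirst_append cur hc] at this
    · have hb1 : (decide (sp.1 < (pvFirst cur).2.1) && decide ((pvFirst cur).1 < sp.2.1)) = false := by
        simp only [Bool.and_eq_false_iff, decide_eq_false_iff_not]; omega
      have hA : pvStepA "keep_first" (init, pvFirst cur) sp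
          = (init ++ [pvFirst cur], (sp.1, sp.2.1, sp.2.2)) := by
        simp [pvStepA]
        all_goals omega
      have hB : pvClusterStep "keep_first" (cls, cur, (pvFirst cur).1, (pvFirst cur).2.1) sp
          = (cls ++ [cur], [sp], sp.1, sp.2.1) := by
        simp [pvClusterStep, hb1]
      rw [hA, hB]
      have hsp : (sp.1, sp.2.1, sp.2.2) = pvFirst [sp] := by simp [pvFirst]
      have h1 : pvFirst [sp] = sp := by simp [pvFirst]
      rw [hsp, ← h1]
      exact ih (init ++ [pvFirst cur]) (cls ++ [cur]) [sp] (by simp) (by simp [hinit])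

-- ===== VERDICT (by name: the statement is the Claim_ definition above) =====
theorem merge_overlapping_spans_spec : Claim_equal_merge_overlapping_spans := by
  intro spans strategy _hdom hpre
  unfold Spec_merge_overlapping_spans
  unfold merge_overlapping_spans merge_overlapping_spans_alt
  by_cases hemp : spans.isEmpty
  · simp [hemp]
  · simp only [hemp, if_false, Bool.false_eq_true]
    rcases hpre with h | h | h
    · exact absurd (by simp [h]) hemp
    · subst h
      simp only [show (("union" == "union" || "union" == "keep_first")) = true from rfl, Bool.not_true,
                 Bool.false_eq_true, if_false]
      cases hs : pvSortSpans spans with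
      | nil => rfl
      | cons h t =>
        simp only []
        have hmain := pvSimUnion t [] [] [h] (by simp) (by simp)
        have h0 : pvOutU [h] = h := by
          simp [pvOutU, pvMinStart, pvMaxEnd, pvLabelOf]
        rw [h0] at hmain
        have h1 : pvMinStart [h] = h.1 := rfl
        have h2 : pvMaxEnd [h] = h.2.1 := rfl
        rw [h1, h2] at hmain
        simpa using hmain
    · subst h
      simp only [show (("keep_first" == "union" || "keep_first" == "keep_first")) = true from rfl, Bool.not_true,
                 Bool.false_eq_true, if_false]
      cases hs : pvSortSpans spans with
      | nil => rfl
      | cons h t =>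
        simp only []
        have hmain := pvSimKeepFirst t [] [] [h] (by simp) (by simp)
        have h0 : pvFirst [h] = h := by simp [pvFirst]
        rw [h0] at hmain
        simpa [show ("keep_first" == "union") = false from rfl] using hmain
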